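-- pv_equiv track=rewrite | github.com/WizardCommander/light_scraper | src/scrapers/lodes_scraper.py | _build_parent_variation_attributes
-- ===== SOURCE A (Python) =====
-- def _build_parent_variation_attributes(
--     variants: list[dict[str, str]], variation_attr_names: set[str]
-- ) -> dict[str, str]:
--     """Build parent product variation attributes with ALL possible values.
--
--     Args:
--         variants: List of variant dictionaries
--         variation_attr_names: Set of variation attribute names
--
--     Returns:
--         Dict mapping attribute names to comma-separated lists of all values
--     """
--     parent_variation_attrs = {}
--
--     for attr_name in variation_attr_names:
--         values = set()
--         for variant in variants:
--             if attr_name in variant and variant[attr_name]: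
--                 values.add(variant[attr_name])
--
--         if values:
--             parent_variation_attrs[attr_name] = ", ".join(sorted(values))
--
--     return parent_variation_attrs
-- ===== SOURCE B (Python) =====
-- def _build_parent_variation_attributes(
--     variants: list[dict[str, str]], variation_attr_names: set[str]
-- ) -> dict[str, str]:
--     """Single sweep over variants building per-attribute value buckets,
--     then one pass over the attribute names to emit the joined strings."""
--     buckets = {}
--     for variant in variants:
--         for name, value in variant.items():
--             if value and name in variation_attr_names:
--                 buckets.setdefault(name, set()).add(value)
--     return {
--         name: ", ".join(sorted(buckets[name]))
--         for name in variation_attr_names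
--         if name in buckets
--     }
-- ===== Notes on version B (the rewrite author's own statement) =====
-- stated objective: faster
-- what changed: B replaces A's per-attribute-name rescans of the whole variant list by a single sweep over the variants that buckets every truthy value under its attribute name (dict of sets built once), followed by one emitting pass over the attribute names.
import Mathlib
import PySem

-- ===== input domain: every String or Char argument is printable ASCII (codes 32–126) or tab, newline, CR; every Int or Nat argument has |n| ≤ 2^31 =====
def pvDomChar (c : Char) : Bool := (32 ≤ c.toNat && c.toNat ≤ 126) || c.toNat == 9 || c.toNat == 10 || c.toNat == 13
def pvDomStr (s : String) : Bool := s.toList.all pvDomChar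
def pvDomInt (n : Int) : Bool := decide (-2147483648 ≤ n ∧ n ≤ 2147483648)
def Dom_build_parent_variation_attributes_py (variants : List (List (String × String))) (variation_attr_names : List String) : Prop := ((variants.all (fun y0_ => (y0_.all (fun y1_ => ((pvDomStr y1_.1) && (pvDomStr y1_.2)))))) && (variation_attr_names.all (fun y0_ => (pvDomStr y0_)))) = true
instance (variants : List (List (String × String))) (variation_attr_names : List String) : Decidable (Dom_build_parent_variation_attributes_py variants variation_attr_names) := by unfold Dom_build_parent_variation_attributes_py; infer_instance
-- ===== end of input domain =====

-- B builds the attribute→values table in ONE sweep over the variants instead of rescanning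
-- all variants once per attribute name; return values proved equal on variants with duplicate-free keys.

-- ===== PORT A =====
-- A's inner loop body: values.add(variant[attr_name]) when attr_name in variant and the value is truthy
def pvAStep (attr_name : String) (vs : PySem.Set String) (variant : List (String × String)) : PySem.Set String :=
  match (PySem.Dict.mk variant).get? attr_name with
  | some v => if v ≠ "" then PySem.Set.add vs v else vs
  | none => vs

def build_parent_variation_attributes_py (variants : List (List (String × String))) (variation_attr_names : List String) : List (String × String) :=
  (variation_attr_names.foldl (fun (acc : PySem.Dict String String) attr_name =>
      let values : PySem.Set String := variants.foldl (pvAStep attr_name) PySem.Set.empty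
      if values ≠ [] then
        acc.insert attr_name (PySem.Str.join ", " (PySem.List.sorted values (fun x => x) false))
      else acc)
    PySem.Dict.empty).items

-- ===== PORT B =====
-- B's innermost loop body: buckets.setdefault(name, set()).add(value) = modify with default empty set
def pvBStep (variation_attr_names : List String) (b : PySem.Dict String (PySem.Set String)) (p : String × String) : PySem.Dict String (PySem.Set String) :=
  if p.2 ≠ "" ∧ p.1 ∈ variation_attr_names then
    b.modify p.1 PySem.Set.empty (fun s => PySem.Set.add s p.2)
  else b

-- 'for name, value in variant.items(): …'
def pvBInner (variation_attr_names : List String) (b : PySem.Dict String (PySem.Set String)) (variant : List (String × String)) : PySem.Dict String (PySem.Set String) :=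
  variant.foldl (pvBStep variation_attr_names) b

def build_parent_variation_attributes_py_alt (variants : List (List (String × String))) (variation_attr_names : List String) : List (String × String) :=
  let buckets : PySem.Dict String (PySem.Set String) :=
    variants.foldl (pvBInner variation_attr_names) PySem.Dict.empty
  (variation_attr_names.foldl (fun (acc : PySem.Dict String String) name =>
      match buckets.get? name with
      | some s => acc.insert name (PySem.Str.join ", " (PySem.List.sorted s (fun x => x) false))
      | none => acc)
    PySem.Dict.empty).items

-- ===== PRECONDITION & SPEC =====
-- Pre_ excludes variant association lists with duplicate keys inside one variant: those do not
-- represent Python dicts (a Python dict always has unique keys), so A is never run on them.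
def Pre_build_parent_variation_attributes_py (variants : List (List (String × String))) (variation_attr_names : List String) : Prop :=
  ∀ v ∈ variants, (v.map Prod.fst).Nodup
instance (variants : List (List (String × String))) (variation_attr_names : List String) : Decidable (Pre_build_parent_variation_attributes_py variants variation_attr_names) := by unfold Pre_build_parent_variation_attributes_py; infer_instance

def pvWitness_build_parent_variation_attributes_py : (List (List (String × String))) × List String :=
  ([[("color", "red"), ("size", "M")], [("color", "blue")]], ["color", "size"])

def Spec_build_parent_variation_attributes_py (variants : List (List (String × String))) (variation_attr_names : List String) (out : List (String × String)) : Prop := out = build_parent_variation_attributes_py_alt variants variation_attr_names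
instance (variants : List (List (String × String))) (variation_attr_names : List String) (out : List (String × String)) : Decidable (Spec_build_parent_variation_attributes_py variants variation_attr_names out) := by unfold Spec_build_parent_variation_attributes_py; infer_instance

-- ===== CLAIM (what is proved, stated in full; the proofs are below) =====
def Claim_equal_build_parent_variation_attributes_py : Prop := ∀ (variants : List (List (String × String))) (variation_attr_names : List String), Dom_build_parent_variation_attributes_py variants variation_attr_names → Pre_build_parent_variation_attributes_py variants variation_attr_names → Spec_build_parent_variation_attributes_py variants variation_attr_names (build_parent_variation_attributes_py variants variation_attr_names)

-- ===== LEMMAS AND PROOFS =====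

-- the effect of one variant on one bucket, at the Option level (dict lookup before/after)
def pvU (names : List String) (name : String) (o : Option (PySem.Set String)) (variant : List (String × String)) : Option (PySem.Set String) :=
  match (PySem.Dict.mk variant).get? name with
  | some v => if v ≠ "" ∧ name ∈ names then some (PySem.Set.add ((o.getD PySem.Set.empty)) v) else o
  | none => o

-- a pair list not containing the key leaves its bucket untouched
theorem pvBStep_skip (names : List String) (name : String) (l : List (String × String))
    (h : name ∉ l.map Prod.fst) (b : PySem.Dict String (PySem.Set String)) :
    (l.foldl (pvBStep names) b).get? name = b.get? name := by
  induction l generalizing b with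
  | nil => rfl
  | cons p rest ih =>
    simp only [List.map_cons, List.mem_cons, not_or] at h
    simp only [List.foldl_cons]
    rw [ih h.2]
    unfold pvBStep
    split_ifs with hc
    · simp [PySem.Dict.modify, PySem.Dict.get?_insert, h.1]
    · rfl

-- B's inner fold over one duplicate-free variant acts on each bucket as pvU
theorem pvBInner_get? (names : List String) (name : String) (l : List (String × String))
    (hnd : (l.map Prod.fst).Nodup) (b : PySem.Dict String (PySem.Set String)) :
    (l.foldl (pvBStep names) b).get? name = pvU names name (b.get? name) l := by
  induction l generalizing b with
  | nil => rfl
  | cons p rest ih =>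
    simp only [List.map_cons, List.nodup_cons] at hnd
    simp only [List.foldl_cons]
    unfold pvU
    by_cases hk : p.1 = name
    · subst hk
      rw [pvBStep_skip names p.1 rest hnd.1]
      rw [PySem.Dict.get?_mk_cons]
      simp only [BEq.rfl, if_pos]
      unfold pvBStep
      split_ifs with hc
      · simp [PySem.Dict.modify, PySem.Dict.get?_insert, PySem.Dict.getD_eq_get?_getD]
      · rfl
    · rw [ih hnd.2]
      have hstep : (pvBStep names b p).get? name = b.get? name := by
        unfold pvBStep
        split_ifs with hc
        · simp [PySem.Dict.modify, PySem.Dict.get?_insert, Ne.symm hk]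
        · rfl
      rw [hstep]
      rw [PySem.Dict.get?_mk_cons]
      have : (p.1 == name) = false := by simp [hk]
      rw [this]
      simp only [Bool.false_eq_true, if_false]
      rfl

-- the whole variants fold, on one bucket
theorem pvBuckets_get? (names : List String) (name : String) (variants : List (List (String × String)))
    (hnd : ∀ v ∈ variants, (v.map Prod.fst).Nodup) (b : PySem.Dict String (PySem.Set String)) :
    (variants.foldl (pvBInner names) b).get? name = variants.foldl (pvU names name) (b.get? name) := by
  induction variants generalizing b with
  | nil => rfl
  | cons v rest ih =>
    simp only [List.foldl_cons]
    rw [ih (fun w hw => hnd w (List.mem_cons_of_mem v hw))]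
    rw [show pvBInner names b v = v.foldl (pvBStep names) b from rfl]
    rw [pvBInner_get? names name v (hnd v (List.mem_cons_self)) b]

-- the simulation relation between B's optional bucket and A's value set
def pvR (o : Option (PySem.Set String)) (s : PySem.Set String) : Prop :=
  (o = none ∧ s = []) ∨ (o = some s ∧ s ≠ [])

theorem pvSet_add_ne_nil (s : PySem.Set String) (v : String) : PySem.Set.add s v ≠ [] := by
  unfold PySem.Set.add
  split_ifs with h
  · intro hnil
    subst hnil
    simp [PySem.Set.contains] at h
  · simp

theorem pvR_step (names : List String) (name : String) (hname : name ∈ names)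
    (o : Option (PySem.Set String)) (s : PySem.Set String) (h : pvR o s)
    (variant : List (String × String)) :
    pvR (pvU names name o variant) (pvAStep name s variant) := by
  unfold pvU pvAStep
  cases hget : (PySem.Dict.mk variant).get? name with
  | none => exact h
  | some v =>
    by_cases hv : v = ""
    · simp [hv]; exact h
    · have hc : v ≠ "" ∧ name ∈ names := ⟨hv, hname⟩
      simp only [if_pos hc, if_pos hv]
      rcases h with ⟨ho, hs⟩ | ⟨ho, hs⟩
      · subst ho; subst hs
        exact Or.inr ⟨rfl, pvSet_add_ne_nil _ _⟩
      · subst ho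
        exact Or.inr ⟨rfl, pvSet_add_ne_nil _ _⟩

theorem pvR_fold (names : List String) (name : String) (hname : name ∈ names)
    (variants : List (List (String × String))) :
    pvR (variants.foldl (pvU names name) none) (variants.foldl (pvAStep name) PySem.Set.empty) := by
  have : ∀ o s, pvR o s → pvR (variants.foldl (pvU names name) o) (variants.foldl (pvAStep name) s) := by
    induction variants with
    | nil => exact fun o s h => h
    | cons v rest ih =>
      intro o s h
      exact ih _ _ (pvR_step names name hname o s h v)
  exact this none PySem.Set.empty (Or.inl ⟨rfl, rfl⟩)

-- ===== VERDICT (by name: the statement is the Claim_ definition above) =====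
theorem build_parent_variation_attributes_py_spec : Claim_equal_build_parent_variation_attributes_py := by
  intro variants names _hdom hpre
  unfold Spec_build_parent_variation_attributes_py
  unfold build_parent_variation_attributes_py build_parent_variation_attributes_py_alt
  simp only []
  congr 1
  apply PySem.List.foldl_congr_mem
  intro acc name hmem
  have hbuck : (variants.foldl (pvBInner names) PySem.Dict.empty).get? name
      = variants.foldl (pvU names name) none := by
    rw [pvBuckets_get? names name variants hpre PySem.Dict.empty]
    rw [PySem.Dict.get?_empty]
  have hR := pvR_fold names name hmem variants
  rcases hR with ⟨ho, hs⟩ | ⟨ho, hs⟩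
  · rw [hbuck, ho, hs]
    simp
  · rw [hbuck, ho]
    have hs' : List.foldl (pvAStep name) [] variants ≠ [] := hs
    simp [hs']
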